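-- pv_equiv track=rewrite | github.com/jakjarvis/aoc_2022 | day3.py | find_badge_id
-- ===== SOURCE A (Python) =====
-- def find_badge_id(trio_of_backpacks):
--     common_list = []
--     for char0 in trio_of_backpacks[0]:
--         if char0 in [*trio_of_backpacks[1]]:
--             common_list += char0
--     for char2 in trio_of_backpacks[2]:
--         if char2 in common_list:
--             return char2
-- ===== SOURCE B (Python) =====
-- def find_badge_id(trio_of_backpacks):
--     for char2 in trio_of_backpacks[2]:
--         if char2 in trio_of_backpacks[0] and char2 in trio_of_backpacks[1]:
--             return char2
-- ===== Notes on version B (the rewrite author's own statement) =====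
-- stated objective: simpler
-- what changed: B drops A's first loop that builds the common_list of chars shared by trio[0] and trio[1]; it scans trio[2] once, returning the first char present in both raw strings, with the same implicit None fall-through.
import Mathlib
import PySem

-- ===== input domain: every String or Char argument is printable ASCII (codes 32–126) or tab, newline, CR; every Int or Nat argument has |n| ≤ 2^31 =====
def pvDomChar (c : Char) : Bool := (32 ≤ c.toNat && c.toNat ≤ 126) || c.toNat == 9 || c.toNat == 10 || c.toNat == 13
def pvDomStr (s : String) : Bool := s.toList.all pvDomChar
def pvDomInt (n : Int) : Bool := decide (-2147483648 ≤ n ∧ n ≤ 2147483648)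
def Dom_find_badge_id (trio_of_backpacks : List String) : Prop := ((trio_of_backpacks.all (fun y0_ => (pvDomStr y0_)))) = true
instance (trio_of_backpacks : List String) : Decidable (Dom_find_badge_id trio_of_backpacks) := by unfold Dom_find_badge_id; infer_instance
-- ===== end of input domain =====

-- B: single scan over trio[2] with inline membership in both raw strings, replacing A's build-then-scan; return value equivalence only.
-- ===== PORT A =====
def find_badge_id (trio_of_backpacks : List String) : Option String :=
  let s0 := (trio_of_backpacks.getD 0 "").toList
  let s1 := (trio_of_backpacks.getD 1 "").toList
  let s2 := (trio_of_backpacks.getD 2 "").toList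
  let common_list := s0.foldl (fun acc c => if s1.contains c then acc ++ [c] else acc) []
  match s2.find? (fun c => common_list.contains c) with
  | some c => some (String.ofList [c])
  | none => none

-- ===== PORT B =====
def find_badge_id_alt (trio_of_backpacks : List String) : Option String :=
  ((trio_of_backpacks.getD 2 "").toList.find?
      (fun c => (trio_of_backpacks.getD 0 "").toList.contains c
                && (trio_of_backpacks.getD 1 "").toList.contains c)).map
    (fun c => String.ofList [c])

-- ===== PRECONDITION & SPEC =====
-- Pre_ excludes lists with fewer than three strings, on which A raises IndexError (B raises there too).
def Pre_find_badge_id (trio_of_backpacks : List String) : Prop := 3 ≤ trio_of_backpacks.length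
instance (trio_of_backpacks : List String) : Decidable (Pre_find_badge_id trio_of_backpacks) := by unfold Pre_find_badge_id; infer_instance
def pvWitness_find_badge_id : List String := ["vJrwpWtwJgWr", "jqHRNqRjqzjGDLGL", "PmmdzqPrVvPwwTWBwg"]
def Spec_find_badge_id (trio_of_backpacks : List String) (out : Option String) : Prop := out = find_badge_id_alt trio_of_backpacks
instance (trio_of_backpacks : List String) (out : Option String) : Decidable (Spec_find_badge_id trio_of_backpacks out) := by unfold Spec_find_badge_id; infer_instance

-- ===== CLAIM (what is proved, stated in full; the proofs are below) =====
def Claim_equal_find_badge_id : Prop := ∀ (trio_of_backpacks : List String), Dom_find_badge_id trio_of_backpacks → Pre_find_badge_id trio_of_backpacks → Spec_find_badge_id trio_of_backpacks (find_badge_id trio_of_backpacks)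

-- ===== LEMMAS AND PROOFS =====
theorem pv_mem_foldl (s0 s1 acc : List Char) (c : Char) :
    c ∈ s0.foldl (fun acc c => if c ∈ s1 then acc ++ [c] else acc) acc
      ↔ c ∈ acc ∨ (c ∈ s0 ∧ c ∈ s1) := by
  induction s0 generalizing acc with
  | nil => simp
  | cons x xs ih =>
      simp only [List.foldl_cons]
      by_cases hx : x ∈ s1
      · rw [if_pos hx, ih]
        by_cases hcx : c = x
        · subst hcx; simp [hx]
        · simp [List.mem_append, hcx]
      · rw [if_neg hx, ih]
        by_cases hcx : c = x
        · subst hcx; simp [hx]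
        · simp [hcx]

-- ===== VERDICT (by name: the statement is the Claim_ definition above) =====
theorem find_badge_id_spec : Claim_equal_find_badge_id := by
  intro t _ _
  unfold Spec_find_badge_id find_badge_id find_badge_id_alt
  have hp : (fun c => (t.getD 0 "").toList.foldl
        (fun acc c => if (t.getD 1 "").toList.contains c then acc ++ [c] else acc) [] |>.contains c)
      = (fun c => (t.getD 0 "").toList.contains c && (t.getD 1 "").toList.contains c) := by
    funext c
    rw [Bool.eq_iff_iff]
    simp [pv_mem_foldl]
  simp only [hp]
  cases ((t.getD 2 "").toList.find?
      (fun c => (t.getD 0 "").toList.contains c && (t.getD 1 "").toList.contains c)) <;> simp
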